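-- pv_equiv track=rewrite | github.com/DJPieter81/MTGSimManu | extract_card_data.py | split_card_list
-- ===== SOURCE A (Python) =====
-- def split_card_list(text, known_cards):
--     """Split a comma-separated list of card names, handling names with commas.
--     Uses known_cards (set of full card names) to greedily match."""
--     if not known_cards:
--         # Fallback: naive split
--         return [c.strip() for c in text.split(',')]
--
--     result = []
--     remaining = text.strip()
--     while remaining:
--         remaining = remaining.lstrip(', ')
--         if not remaining:
--             break
--         # Try to match longest known card name first
--         best = None
--         for card in known_cards:
--             if remaining.startswith(card):
--                 if best is None or len(card) > len(best):
--                     best = card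
--         if best:
--             result.append(best)
--             remaining = remaining[len(best):]
--         else:
--             # Unknown card (token etc) — take up to next comma
--             # But be careful: might be "Warrior Token, Warrior Token"
--             parts = remaining.split(',', 1)
--             result.append(parts[0].strip())
--             remaining = parts[1] if len(parts) > 1 else ''
--     return result
-- ===== SOURCE B (Python) =====
-- def split_card_list(text, known_cards):
--     """Greedy split using length-indexed probes into a hash set of known names
--     (instead of scanning the whole known_cards list at every position)."""
--     if not known_cards:
--         return [c.strip() for c in text.split(',')]
--     cardset = set(known_cards)
--     lengths = sorted({len(c) for c in cardset if c}, reverse=True)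
--     result = []
--     remaining = text.strip()
--     while remaining:
--         remaining = remaining.lstrip(', ')
--         if not remaining:
--             break
--         match = None
--         for L in lengths:
--             if L <= len(remaining) and remaining[:L] in cardset:
--                 match = remaining[:L]
--                 break
--         if match is not None:
--             result.append(match)
--             remaining = remaining[len(match):]
--         else:
--             parts = remaining.split(',', 1)
--             result.append(parts[0].strip())
--             remaining = parts[1] if len(parts) > 1 else ''
--     return result
-- ===== Notes on version B (the rewrite author's own statement) =====
-- stated objective: faster
-- what changed: A scans the whole known_cards list at every text position to find the longest matching name; B precomputes a hash set of the names plus the sorted distinct name lengths, and at each position probes the set once per distinct length (longest first), so the inner scan over known_cards disappears.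
import Mathlib
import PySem

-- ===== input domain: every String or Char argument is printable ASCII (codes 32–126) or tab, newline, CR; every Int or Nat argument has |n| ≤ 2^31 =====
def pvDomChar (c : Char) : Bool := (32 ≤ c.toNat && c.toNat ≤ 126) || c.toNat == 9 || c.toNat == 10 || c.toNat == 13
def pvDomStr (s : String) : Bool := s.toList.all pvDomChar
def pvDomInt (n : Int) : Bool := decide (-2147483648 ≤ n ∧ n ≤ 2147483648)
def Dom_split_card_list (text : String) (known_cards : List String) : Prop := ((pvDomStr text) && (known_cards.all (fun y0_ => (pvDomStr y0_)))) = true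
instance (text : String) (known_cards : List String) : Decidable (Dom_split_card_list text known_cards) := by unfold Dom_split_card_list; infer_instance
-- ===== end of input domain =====

-- B replaces A's per-position scan of the whole known_cards list by length-indexed probes
-- (take the next `L` characters, one hash-set membership test per distinct card length,
-- longest length first); objective: faster inner matching.

-- shared helper: exact port of Python's  s.lstrip(', ')  (drop leading ',' and ' ' characters)
def sclLstripCS (cs : List Char) : List Char := cs.dropWhile (fun c => c == ',' || c == ' ')

-- ===== PORT A =====
-- loop body of  `for card in known_cards: if remaining.startswith(card): if best is None or len(card) > len(best): best = card`
def sclStep (rem : List Char) (best : Option (List Char)) (card : List Char) : Option (List Char) :=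
  if PySem.Chars.startswith rem card then
    match best with
    | none => some card
    | some b => if b.length < card.length then some card else best
  else best

def sclBestA (cards : List (List Char)) (rem : List Char) : Option (List Char) :=
  cards.foldl (sclStep rem) none

-- the `while remaining:` loop of A; fuel ≥ |remaining| + 1 suffices (each pass shortens remaining)
def sclLoopA (cards : List (List Char)) : Nat → List Char → List (List Char) → List (List Char)
  | 0, _, acc => acc
  | fuel+1, remaining, acc =>
    if remaining.isEmpty then acc
    else
      let rem := sclLstripCS remaining
      if rem.isEmpty then acc
      else
        match sclBestA cards rem with
        | some (c :: cs) =>      -- `if best:` — only a non-empty best is truthy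
            sclLoopA cards fuel (rem.drop (c :: cs).length) (acc ++ [c :: cs])
        | _ =>                   -- best is None or '' : take up to next comma
            let parts := PySem.Chars.splitOnMax rem [','] 1
            sclLoopA cards fuel (match parts with | _ :: p1 :: _ => p1 | _ => [])
              (acc ++ [PySem.Chars.strip (parts.headD [])])   -- parts[0]; split always returns ≥ 1 part

def split_card_list (text : String) (known_cards : List String) : List String :=
  if known_cards.isEmpty then
    (PySem.Chars.splitOn text.toList [',']).map (fun c => String.mk (PySem.Chars.strip c))
  else
    let s := PySem.Chars.strip text.toList
    (sclLoopA (known_cards.map String.toList) (s.length + 1) s []).map String.mk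

-- ===== PORT B =====
-- lengths = sorted({len(c) for c in cardset if c}, reverse=True)
def sclLengths (cardset : PySem.Set (List Char)) : List Nat :=
  PySem.List.sorted (PySem.Set.ofList ((cardset.filter (fun c => !c.isEmpty)).map List.length))
    (fun L => L) true

-- `for L in lengths: if L <= len(remaining) and remaining[:L] in cardset: match = remaining[:L]; break`
def sclMatchB (cardset : PySem.Set (List Char)) : List Nat → List Char → Option (List Char)
  | [], _ => none
  | L :: ls, rem =>
    if decide (L ≤ rem.length) && PySem.Set.contains cardset (rem.take L) then some (rem.take L)
    else sclMatchB cardset ls rem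

def sclLoopB (lengths : List Nat) (cardset : PySem.Set (List Char)) :
    Nat → List Char → List (List Char) → List (List Char)
  | 0, _, acc => acc
  | fuel+1, remaining, acc =>
    if remaining.isEmpty then acc
    else
      let rem := sclLstripCS remaining
      if rem.isEmpty then acc
      else
        match sclMatchB cardset lengths rem with
        | some m => sclLoopB lengths cardset fuel (rem.drop m.length) (acc ++ [m])
        | none =>
            let parts := PySem.Chars.splitOnMax rem [','] 1
            sclLoopB lengths cardset fuel (match parts with | _ :: p1 :: _ => p1 | _ => [])
              (acc ++ [PySem.Chars.strip (parts.headD [])])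

def split_card_list_alt (text : String) (known_cards : List String) : List String :=
  if known_cards.isEmpty then
    (PySem.Chars.splitOn text.toList [',']).map (fun c => String.mk (PySem.Chars.strip c))
  else
    let cardset : PySem.Set (List Char) := PySem.Set.ofList (known_cards.map String.toList)
    let lengths := sclLengths cardset
    let s := PySem.Chars.strip text.toList
    (sclLoopB lengths cardset (s.length + 1) s []).map String.mk

-- ===== PRECONDITION & SPEC =====
def Spec_split_card_list (text : String) (known_cards : List String) (out : List String) : Prop := out = split_card_list_alt text known_cards
instance (text : String) (known_cards : List String) (out : List String) : Decidable (Spec_split_card_list text known_cards out) := by unfold Spec_split_card_list; infer_instance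

-- ===== CLAIM (what is proved, stated in full; the proofs are below) =====
def Claim_equal_split_card_list : Prop := ∀ (text : String) (known_cards : List String), Dom_split_card_list text known_cards → Spec_split_card_list text known_cards (split_card_list text known_cards)

-- ===== LEMMAS AND PROOFS =====

-- A's fold step facts
lemma step_some (rem : List Char) (acc : Option (List Char)) (c : List Char) :
    (∀ b, acc = some b → b <+: rem) →
    ∀ b, sclStep rem acc c = some b →
      b <+: rem ∧ (acc = some b ∨ b = c)
      ∧ (∀ a, acc = some a → a.length ≤ b.length)
      ∧ (c <+: rem → c.length ≤ b.length) := by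
  intro hacc b hb
  cases acc with
  | none =>
    simp only [sclStep] at hb
    split_ifs at hb with hsw
    cases hb
    exact ⟨(PySem.Chars.startswith_iff rem c).mp hsw, Or.inr rfl, by simp, fun _ => le_rfl⟩
  | some a =>
    simp only [sclStep] at hb
    split_ifs at hb with hsw hl
    · cases hb
      refine ⟨(PySem.Chars.startswith_iff rem c).mp hsw, Or.inr rfl, ?_, fun _ => le_rfl⟩
      intro x hx
      cases hx
      omega
    · cases hb
      refine ⟨hacc _ rfl, Or.inl rfl, ?_, ?_⟩
      · intro x hx
        cases hx
        omega
      · intro _; omega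
    · cases hb
      refine ⟨hacc _ rfl, Or.inl rfl, ?_, ?_⟩
      · intro x hx
        cases hx
        omega
      · intro hpre
        exact absurd ((PySem.Chars.startswith_iff rem c).mpr hpre) hsw

lemma step_none (rem : List Char) (acc : Option (List Char)) (c : List Char) :
    sclStep rem acc c = none → acc = none ∧ ¬ c <+: rem := by
  intro hb
  cases acc with
  | none =>
    simp only [sclStep] at hb
    split_ifs at hb with hsw
    exact ⟨rfl, fun hpre => hsw ((PySem.Chars.startswith_iff rem c).mpr hpre)⟩
  | some a =>
    simp only [sclStep] at hb
    split_ifs at hb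

-- A's fold: if it yields `some b`, b is a longest card that prefixes rem; if `none`, nothing matches.
lemma bestA_go (rem : List Char) (cs : List (List Char)) :
    ∀ (acc : Option (List Char)), (∀ b, acc = some b → b <+: rem) →
      ((cs.foldl (sclStep rem) acc = none → acc = none ∧ ∀ c ∈ cs, ¬ c <+: rem)
      ∧ (∀ b, cs.foldl (sclStep rem) acc = some b →
          b <+: rem ∧ (acc = some b ∨ b ∈ cs)
          ∧ (∀ a, acc = some a → a.length ≤ b.length)
          ∧ (∀ c ∈ cs, c <+: rem → c.length ≤ b.length))) := by
  induction cs with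
  | nil =>
    intro acc hacc
    refine ⟨fun h => ⟨h, by simp⟩, ?_⟩
    intro b hb
    simp only [List.foldl_nil] at hb
    refine ⟨hacc b hb, Or.inl hb, ?_, by simp⟩
    intro a ha
    rw [hb] at ha; cases ha; exact le_rfl
  | cons c cs ih =>
    intro acc hacc
    have hstep := step_some rem acc c hacc
    have hacc' : ∀ b, sclStep rem acc c = some b → b <+: rem :=
      fun b hb => (hstep b hb).1
    obtain ⟨ihn, ihs⟩ := ih (sclStep rem acc c) hacc'
    constructor
    · intro h
      simp only [List.foldl_cons] at h
      obtain ⟨h1, h2⟩ := ihn h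
      obtain ⟨h3, h4⟩ := step_none rem acc c h1
      refine ⟨h3, fun x hx => ?_⟩
      rcases List.mem_cons.mp hx with heq | hx
      · subst heq; exact h4
      · exact h2 _ hx
    · intro b hb
      simp only [List.foldl_cons] at hb
      obtain ⟨hpre, hsrc, hge, hmax⟩ := ihs b hb
      refine ⟨hpre, ?_, ?_, ?_⟩
      · rcases hsrc with h | h
        · rcases (hstep b h).2.1 with h' | h'
          · exact Or.inl h'
          · exact Or.inr (by rw [h']; exact List.mem_cons_self ..)
        · exact Or.inr (List.mem_cons_of_mem _ h)
      · intro a ha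
        cases hacc'' : sclStep rem acc c with
        | none => obtain ⟨h1, _⟩ := step_none rem acc c hacc''; rw [ha] at h1; cases h1
        | some a' => exact le_trans ((hstep a' hacc'').2.2.1 a ha) (hge a' hacc'')
      · intro x hx hxpre
        rcases List.mem_cons.mp hx with heq | hx
        · subst heq
          cases hacc'' : sclStep rem acc x with
          | none => exact absurd hxpre (step_none rem acc x hacc'').2
          | some a' =>
            exact le_trans ((step_some rem acc x hacc a' hacc'').2.2.2 hxpre) (hge a' hacc'')

        · exact hmax x hx hxpre

-- B's probe scan, on a strictly descending list of positive lengths covering all matching card lengths.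
lemma matchB_go (cards : List (List Char)) (rem : List Char) :
    ∀ (ls : List Nat), (∀ L ∈ ls, 0 < L) → ls.Pairwise (· > ·) →
      (∀ c ∈ cards, c ≠ [] → c <+: rem → c.length ∈ ls) →
      ((sclMatchB (PySem.Set.ofList cards) ls rem = none → ∀ c ∈ cards, c ≠ [] → ¬ c <+: rem)
      ∧ (∀ b, sclMatchB (PySem.Set.ofList cards) ls rem = some b →
          b ∈ cards ∧ b ≠ [] ∧ b <+: rem ∧ ∀ c ∈ cards, c <+: rem → c.length ≤ b.length)) := by
  intro ls
  induction ls with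
  | nil =>
    intro _ _ hcover
    constructor
    · intro _ c hc hne hpre
      exact absurd (hcover c hc hne hpre) (List.not_mem_nil)
    · intro b hb; simp [sclMatchB] at hb
  | cons L ls ih =>
    intro hpos hsorted hcover
    by_cases hhit : (decide (L ≤ rem.length) && PySem.Set.contains (PySem.Set.ofList cards) (rem.take L)) = true
    · have hmb : sclMatchB (PySem.Set.ofList cards) (L :: ls) rem = some (rem.take L) := by
        simp only [sclMatchB, hhit, if_true]
      rw [hmb]
      simp only [Bool.and_eq_true, decide_eq_true_eq] at hhit
      obtain ⟨hle, hmem⟩ := hhit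
      have hmemc : rem.take L ∈ cards :=
        (PySem.Set.mem_ofList cards _).mp ((PySem.Set.contains_iff _ _).mp hmem)
      have hlen : (rem.take L).length = L := by simp [List.length_take]; omega
      constructor
      · intro h; cases h
      · intro b hb
        cases hb
        refine ⟨hmemc, ?_, List.take_prefix L rem, ?_⟩
        · intro h
          have := hpos L (List.mem_cons_self ..)
          rw [h] at hlen; simp at hlen; omega
        · intro c hc hcpre
          rw [hlen]
          by_cases hne : c = []
          · subst hne; simp
          · have := hcover c hc hne hcpre
            rcases List.mem_cons.mp this with heq | hmem'
            · omega
            · have := (List.pairwise_cons.mp hsorted).1 _ hmem'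
              omega
    · have hmb : sclMatchB (PySem.Set.ofList cards) (L :: ls) rem
          = sclMatchB (PySem.Set.ofList cards) ls rem := by
        rw [Bool.not_eq_true] at hhit
        simp only [sclMatchB, hhit, Bool.false_eq_true, if_false]
      rw [hmb]
      rw [Bool.not_eq_true] at hhit
      apply ih
      · exact fun L' h => hpos L' (List.mem_cons_of_mem _ h)
      · exact (List.pairwise_cons.mp hsorted).2
      · intro c hc hne hpre
        have hmem := hcover c hc hne hpre
        rcases List.mem_cons.mp hmem with heq | h
        · exfalso
          have hle : c.length ≤ rem.length := hpre.length_le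
          have htake : rem.take L = c := by
            rw [← heq]
            exact (List.prefix_iff_eq_take.mp hpre).symm
          have hcond : (decide (L ≤ rem.length)
              && PySem.Set.contains (PySem.Set.ofList cards) (rem.take L)) = true := by
            simp only [Bool.and_eq_true, decide_eq_true_eq]
            refine ⟨by omega, ?_⟩
            rw [htake]
            exact (PySem.Set.contains_iff _ _).mpr ((PySem.Set.mem_ofList cards c).mpr hc)
          rw [hcond] at hhit
          cases hhit
        · exact h

lemma lengths_pos (cards : List (List Char)) :
    ∀ L ∈ sclLengths (PySem.Set.ofList cards), 0 < L := by
  intro L hL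
  unfold sclLengths at hL
  rw [PySem.List.mem_sorted] at hL
  rw [PySem.Set.mem_ofList] at hL
  obtain ⟨c, hc, rfl⟩ := List.mem_map.mp hL
  have := (List.mem_filter.mp hc).2
  simp only [Bool.not_eq_true'] at this
  cases c with
  | nil => simp at this
  | cons a as => simp

lemma lengths_sorted (cards : List (List Char)) :
    (sclLengths (PySem.Set.ofList cards)).Pairwise (· > ·) := by
  unfold sclLengths
  have hpw := PySem.List.sorted_pairwise_rev
    (PySem.Set.ofList ((List.filter (fun c => !c.isEmpty) (PySem.Set.ofList cards)).map List.length))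
    (fun L : Nat => L)
  have hnd : (PySem.List.sorted
      (PySem.Set.ofList ((List.filter (fun c => !c.isEmpty) (PySem.Set.ofList cards)).map List.length))
      (fun L : Nat => L) true).Nodup := by
    exact (PySem.List.sorted_perm _ _ _).symm.nodup (PySem.Set.nodup_ofList _)
  exact (hpw.and hnd).imp (fun h => lt_of_le_of_ne h.1 (Ne.symm h.2))

lemma lengths_cover (cards : List (List Char)) :
    ∀ c ∈ cards, c ≠ [] → c.length ∈ sclLengths (PySem.Set.ofList cards) := by
  intro c hc hne
  unfold sclLengths
  rw [PySem.List.mem_sorted, PySem.Set.mem_ofList]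
  apply List.mem_map.mpr
  refine ⟨c, ?_, rfl⟩
  apply List.mem_filter.mpr
  refine ⟨(PySem.Set.mem_ofList cards c).mpr hc, ?_⟩
  cases c with
  | nil => exact absurd rfl hne
  | cons a as => simp

-- the two inner matchers agree (after A's `if best:` truthiness filter)
lemma matchB_eq_bestA (cards : List (List Char)) (rem : List Char) :
    sclMatchB (PySem.Set.ofList cards) (sclLengths (PySem.Set.ofList cards)) rem
      = match sclBestA cards rem with
        | some (c :: cs) => some (c :: cs)
        | _ => none := by
  obtain ⟨hAn, hAs⟩ := bestA_go rem cards none (by simp)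
  obtain ⟨hBn, hBs⟩ := matchB_go cards rem (sclLengths (PySem.Set.ofList cards))
    (lengths_pos cards) (lengths_sorted cards) (fun c hc hne _ => lengths_cover cards c hc hne)
  cases hA : sclBestA cards rem with
  | none =>
    cases hB : sclMatchB (PySem.Set.ofList cards) (sclLengths (PySem.Set.ofList cards)) rem with
    | none => rfl
    | some b =>
      obtain ⟨hbc, hbne, hbpre, _⟩ := hBs b hB
      exact absurd hbpre ((hAn hA).2 b hbc)
  | some b =>
    obtain ⟨hbpre, hbsrc, _, hbmax⟩ := hAs b hA
    have hbc : b ∈ cards := by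
      rcases hbsrc with h | h
      · simp at h
      · exact h
    cases b with
    | nil =>
      cases hB : sclMatchB (PySem.Set.ofList cards) (sclLengths (PySem.Set.ofList cards)) rem with
      | none => rfl
      | some b' =>
        obtain ⟨hc', hne', hpre', _⟩ := hBs b' hB
        have hle := hbmax b' hc' hpre'
        cases b' with
        | nil => exact absurd rfl hne'
        | cons y ys => simp at hle
    | cons x xs =>
      cases hB : sclMatchB (PySem.Set.ofList cards) (sclLengths (PySem.Set.ofList cards)) rem with
      | none => exact absurd hbpre (hBn hB (x :: xs) hbc (by simp))
      | some b' =>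
        obtain ⟨hc', hne', hpre', hmax'⟩ := hBs b' hB
        have h1 := hbmax b' hc' hpre'
        have h2 := hmax' (x :: xs) hbc hbpre
        have hlen : b'.length = (x :: xs).length := le_antisymm h1 h2
        have e1 : b' = rem.take b'.length := List.prefix_iff_eq_take.mp hpre'
        have e2 : x :: xs = rem.take (x :: xs).length := List.prefix_iff_eq_take.mp hbpre
        have : b' = x :: xs := by rw [e1, hlen, ← e2]
        rw [this]

lemma loopB_eq_loopA (cards : List (List Char)) :
    ∀ (fuel : Nat) (rem acc : _),
      sclLoopB (sclLengths (PySem.Set.ofList cards)) (PySem.Set.ofList cards) fuel rem acc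
        = sclLoopA cards fuel rem acc := by
  intro fuel
  induction fuel with
  | zero => intro rem acc; rfl
  | succ n ih =>
    intro rem acc
    simp only [sclLoopA, sclLoopB]
    by_cases h1 : rem.isEmpty
    · simp [h1]
    · simp only [h1, Bool.false_eq_true, if_false]
      by_cases h2 : (sclLstripCS rem).isEmpty
      · simp [h2]
      · simp only [h2, Bool.false_eq_true, if_false]
        rw [matchB_eq_bestA cards (sclLstripCS rem)]
        cases hA : sclBestA cards (sclLstripCS rem) with
        | none => simp only []; rw [ih]
        | some b =>
          cases b with
          | nil => simp only []; rw [ih]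
          | cons x xs => simp only []; rw [ih]

-- ===== VERDICT (by name: the statement is the Claim_ definition above) =====
theorem split_card_list_spec : Claim_equal_split_card_list := by
  intro text known_cards _
  unfold Spec_split_card_list split_card_list split_card_list_alt
  by_cases h : known_cards.isEmpty
  · simp [h]
  · simp only [h, if_neg, Bool.false_eq_true, not_false_eq_true]
    rw [loopB_eq_loopA]
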